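-- pv_equiv track=rewrite | github.com/BuiThiThanhTrang/BioinformaticsCoursera | Course_2_04_De_Bruijn_Graph_from_a_String_Problem/Course_2_04_De_Bruijn_Graph_from_a_String_Problem.py | DeBruijn
-- ===== SOURCE A (Python) =====
-- from collections import defaultdict
--
-- def Composition(k, Text):
--     Comp = []
--     for i in range(len(Text) - k + 1):
--         Comp.append(Text[i:i + k])
--     return Comp
--
-- def DeBruijn(k, Text):
--     Patterns = Composition(k - 1, Text)
--     Positions = defaultdict(list)
--     for i in range(len(Patterns)):
--         Positions[Patterns[i]].append(i)
--     DB = defaultdict(list)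
--     for Node, Pos in Positions.items():
--         for i in Pos:
--             if i + k <= len(Text):
--                 DB[Node].append(Text[i+1: i + k])
--     return DB
-- ===== SOURCE B (Python) =====
-- from collections import defaultdict
--
-- def DeBruijn(k, Text):
--     DB = defaultdict(list)
--     for i in range(len(Text) - k + 1):
--         DB[Text[i:i + k - 1]].append(Text[i + 1:i + k])
--     return DB
-- ===== Notes on version B (the rewrite author's own statement) =====
-- stated objective: simpler
-- what changed: Replaces A's two-phase construction (build the (k-1)-mer Composition list, group indices into a Positions defaultdict, then a nested loop over that index with an i+k<=len(Text) guard) by a single flat loop over range(len(Text)-k+1) that appends each suffix Text[i+1:i+k] directly under its node Text[i:i+k-1].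
import Mathlib
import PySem

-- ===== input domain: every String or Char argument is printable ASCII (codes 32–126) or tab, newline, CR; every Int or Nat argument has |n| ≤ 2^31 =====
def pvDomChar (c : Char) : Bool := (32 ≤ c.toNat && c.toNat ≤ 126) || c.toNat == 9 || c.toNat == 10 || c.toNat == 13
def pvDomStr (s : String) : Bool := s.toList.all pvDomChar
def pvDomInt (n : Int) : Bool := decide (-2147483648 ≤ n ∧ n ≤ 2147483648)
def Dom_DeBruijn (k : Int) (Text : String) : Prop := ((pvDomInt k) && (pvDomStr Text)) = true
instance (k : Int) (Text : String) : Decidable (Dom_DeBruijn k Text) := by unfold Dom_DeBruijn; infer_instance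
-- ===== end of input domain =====

-- ===== PORT A =====
-- B replaces A's two-phase build (k-1-mer composition list, a Positions index grouping
-- pattern -> occurrence indices, then a nested loop over the index) by one flat loop
-- appending each suffix directly; same return value (objective: simpler).

-- helper of A: pvComposition = Composition(k, Text) = list of all k-slices
def pvComposition (k : Int) (Text : String) : List String :=
  (PySem.List.pyRange 0 (PySem.Str.len Text - k + 1)).foldl
    (fun Comp i => Comp ++ [PySem.Str.slice Text (some i) (some (i + k))]) []

def DeBruijn (k : Int) (Text : String) : List (String × List String) :=
  let Patterns := pvComposition (k - 1) Text
  let Positions : PySem.Dict String (List Int) :=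
    (PySem.List.pyRange 0 ((Patterns.length : Nat) : Int)).foldl
      (fun d i => d.modify (PySem.List.pyGetD Patterns i "") [] (fun v => v ++ [i]))
      PySem.Dict.empty
  let DB : PySem.Dict String (List String) :=
    Positions.items.foldl
      (fun d pr =>
        pr.2.foldl
          (fun d i =>
            if i + k ≤ PySem.Str.len Text then
              d.modify pr.1 [] (fun v => v ++ [PySem.Str.slice Text (some (i + 1)) (some (i + k))])
            else d)
          d)
      PySem.Dict.empty
  DB.items

-- ===== PORT B =====
def DeBruijn_alt (k : Int) (Text : String) : List (String × List String) :=
  ((PySem.List.pyRange 0 (PySem.Str.len Text - k + 1)).foldl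
    (fun d i =>
      d.modify (PySem.Str.slice Text (some i) (some (i + k - 1))) []
        (fun v => v ++ [PySem.Str.slice Text (some (i + 1)) (some (i + k))]))
    (PySem.Dict.empty : PySem.Dict String (List String))).items

-- ===== PRECONDITION & SPEC =====
def Spec_DeBruijn (k : Int) (Text : String) (out : List (String × List String)) : Prop := out = DeBruijn_alt k Text
instance (k : Int) (Text : String) (out : List (String × List String)) : Decidable (Spec_DeBruijn k Text out) := by unfold Spec_DeBruijn; infer_instance

-- ===== CLAIM (what is proved, stated in full; the proofs are below) =====
def Claim_equal_DeBruijn : Prop := ∀ (k : Int) (Text : String), Dom_DeBruijn k Text → Spec_DeBruijn k Text (DeBruijn k Text)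

-- ===== LEMMAS AND PROOFS =====

-- pyRange is unchanged by casting its (possibly negative) bound through toNat
theorem pvRange_toNat (m : Int) :
    PySem.List.pyRange 0 ((m.toNat : Nat) : Int) = PySem.List.pyRange 0 m := by
  by_cases h : 0 ≤ m
  · rw [Int.toNat_of_nonneg h]
  · rw [PySem.List.pyRange_one_eq_nil (by omega), PySem.List.pyRange_one_eq_nil (by omega)]

-- a run of appends at one already-present key rewrites that key's entry in place
theorem pvRunItemsContains {κ β : Type} [BEq κ] [LawfulBEq κ] (c : κ) (g : Int → β) :
    ∀ (P : List Int) (d : PySem.Dict κ (List β)), d.contains c = true → d.keys.Nodup →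
      (P.foldl (fun d i => d.modify c [] (fun v => v ++ [g i])) d).items
        = d.items.map (fun pr => if pr.1 == c then (pr.1, pr.2 ++ P.map g) else pr) := by
  intro P
  induction P with
  | nil =>
    intro d _ _
    simp only [List.foldl_nil, List.map_nil, List.append_nil]
    exact ((List.map_congr_left (fun pr _ => by split <;> simp)).trans (List.map_id _)).symm
  | cons i P ih =>
    intro d hc hnd
    have hmod : d.modify c [] (fun v => v ++ [g i]) = d.insert c (d.getD c [] ++ [g i]) := rfl
    have hit : (d.insert c (d.getD c [] ++ [g i])).items
        = d.items.map (fun p => if p.1 == c then (c, d.getD c [] ++ [g i]) else p) :=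
      PySem.Dict.items_insert_of_contains d _ hc
    have hkeys : (d.insert c (d.getD c [] ++ [g i])).keys = d.keys := by
      simp only [PySem.Dict.keys, hit, List.map_map]
      refine List.map_congr_left (fun p _ => ?_)
      by_cases h : p.1 == c
      · simp [eq_of_beq h]
      · simp [h]
    have hc' : (d.insert c (d.getD c [] ++ [g i])).contains c = true :=
      PySem.Dict.contains_insert_self d c _
    rw [List.foldl_cons, hmod, ih _ hc' (hkeys ▸ hnd), hit, List.map_map]
    refine List.map_congr_left (fun p hp => ?_)
    simp only [Function.comp_apply]
    by_cases h : p.1 == c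
    · have hpc : p.1 = c := eq_of_beq h
      have hpv : d.getD c [] = p.2 := by
        have : (c, p.2) ∈ d.items := by rw [← hpc]; exact hp
        exact PySem.Dict.getD_of_mem_items d this hnd []
      simp [hpc, ← hpv, List.map_cons]
    · simp [h]

-- a nonempty run of appends at a fresh key appends one entry
theorem pvRunItemsFresh {κ β : Type} [BEq κ] [LawfulBEq κ] (c : κ) (g : Int → β) (i : Int) (P : List Int)
    (d : PySem.Dict κ (List β)) (hc : d.contains c = false) (hnd : d.keys.Nodup) :
    ((i :: P).foldl (fun d j => d.modify c [] (fun v => v ++ [g j])) d).items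
      = d.items ++ [(c, (i :: P).map g)] := by
  have hcm : c ∉ d.keys := fun h =>
    by simp [(PySem.Dict.contains_iff_mem_keys d c).mpr h] at hc
  have hgd : d.getD c [] = [] := PySem.Dict.getD_of_not_contains d [] hc
  have hmod : d.modify c [] (fun v => v ++ [g i]) = d.insert c [g i] := by
    simp [PySem.Dict.modify, hgd]
  have hit : (d.insert c [g i]).items = d.items ++ [(c, [g i])] :=
    PySem.Dict.items_insert_of_not_contains d _ hc
  have hkeys : (d.insert c [g i]).keys = d.keys ++ [c] := by
    simp [PySem.Dict.keys, hit]
  have hnd' : (d.insert c [g i]).keys.Nodup := by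
    rw [hkeys]
    exact List.Nodup.append hnd (List.nodup_singleton c)
      (fun a ha hb => hcm ((List.mem_singleton.mp hb) ▸ ha))
  have hc' : (d.insert c [g i]).contains c = true := PySem.Dict.contains_insert_self d c _
  rw [List.foldl_cons, hmod, pvRunItemsContains c g P _ hc' hnd', hit, List.map_append]
  have h1 : d.items.map (fun pr => if pr.1 == c then (pr.1, pr.2 ++ P.map g) else pr) = d.items := by
    refine (List.map_congr_left (fun p hp => ?_)).trans (List.map_id _)
    have : p.1 ≠ c := fun h => hcm (h ▸ (List.mem_map.mpr ⟨p, hp, rfl⟩))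
    simp [this]
  rw [h1]
  simp

-- the grouped nested loop of A, flattened: items of the result, entry by entry
theorem pvOuterItems {κ β : Type} [BEq κ] [LawfulBEq κ] (g : Int → β) (q : Int → Bool) :
    ∀ (l : List (κ × List Int)) (d : PySem.Dict κ (List β)),
      d.keys.Nodup → (∀ pr ∈ l, d.contains pr.1 = false) → (l.map Prod.fst).Nodup →
      (l.foldl (fun d pr => (pr.2.filter q).foldl (fun d i => d.modify pr.1 [] (fun v => v ++ [g i])) d) d).items
        = d.items ++ (l.filter (fun pr => !(pr.2.filter q).isEmpty)).map
            (fun pr => (pr.1, (pr.2.filter q).map g)) := by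
  intro l
  induction l with
  | nil => intro d _ _ _; simp
  | cons pr l ih =>
    intro d hnd hfresh hkd
    have hkd' : (l.map Prod.fst).Nodup := (List.nodup_cons.mp hkd).2
    have hkne : ∀ p ∈ l, p.1 ≠ pr.1 := by
      intro p hp h
      exact (List.nodup_cons.mp hkd).1 (h ▸ List.mem_map.mpr ⟨p, hp, rfl⟩)
    rw [List.foldl_cons]
    cases hP : pr.2.filter q with
    | nil =>
      simp only [List.foldl_nil]
      rw [ih d hnd (fun p hp => hfresh p (List.mem_cons_of_mem _ hp)) hkd']
      simp [hP]
    | cons i P =>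
      have hc : d.contains pr.1 = false := hfresh pr (List.mem_cons_self)
      have hrun := pvRunItemsFresh pr.1 g i P d hc hnd
      set d1 := (i :: P).foldl (fun d j => d.modify pr.1 [] (fun v => v ++ [g j])) d with hd1
      have hcm : pr.1 ∉ d.keys := fun h =>
        by simp [(PySem.Dict.contains_iff_mem_keys d pr.1).mpr h] at hc
      have hkeys1 : d1.keys = d.keys ++ [pr.1] := by
        simp [PySem.Dict.keys, hrun]
      have hnd1 : d1.keys.Nodup := by
        rw [hkeys1]
        exact List.Nodup.append hnd (List.nodup_singleton _)
          (fun a ha hb => hcm ((List.mem_singleton.mp hb) ▸ ha))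
      have hfresh1 : ∀ p ∈ l, d1.contains p.1 = false := by
        intro p hp
        have : p.1 ∉ d1.keys := by
          rw [hkeys1]
          intro hmem
          rcases List.mem_append.mp hmem with h | h
          · exact absurd ((PySem.Dict.contains_iff_mem_keys d p.1).mpr h)
              (by simp [hfresh p (List.mem_cons_of_mem _ hp)])
          · exact hkne p hp (List.mem_singleton.mp h)
        cases hb : d1.contains p.1 with
        | false => rfl
        | true => exact absurd ((PySem.Dict.contains_iff_mem_keys d1 p.1).mp hb) this
      rw [ih d1 hnd1 hfresh1 hkd', hrun]
      simp [hP, List.append_assoc]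

-- updating a set by further elements does not change its filtered part when the filter implies membership
theorem pvUpdateFilter {α : Type} [BEq α] [LawfulBEq α] (p : α → Bool) :
    ∀ (T s : List α), (∀ x ∈ T, p x = true → x ∈ s) →
      List.filter p (PySem.Set.update s T) = List.filter p s := by
  intro T
  induction T with
  | nil => intro s _; rfl
  | cons t T ih =>
    intro s h
    have hstep : PySem.Set.update s (t :: T) = PySem.Set.update (PySem.Set.add s t) T := rfl
    rw [hstep]
    have hmem : PySem.Set.contains s t = true ↔ t ∈ s := by
      simp [PySem.Set.contains]
    by_cases hc : PySem.Set.contains s t = true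
    · have : PySem.Set.add s t = s := by simp [PySem.Set.add, hmem.mp hc]
      rw [this]
      exact ih s (fun x hx => h x (List.mem_cons_of_mem _ hx))
    · have htns : t ∉ s := fun hm => hc (hmem.mpr hm)
      have hadd : PySem.Set.add s t = s ++ [t] := by simp [PySem.Set.add, htns]
      have hpt : p t = false := by
        cases hb : p t with
        | false => rfl
        | true => exact absurd (h t List.mem_cons_self hb) htns
      rw [hadd, ih (s ++ [t]) (fun x hx hpx => List.mem_append_left _ (h x (List.mem_cons_of_mem _ hx) hpx))]
      simp [List.filter_append, hpt]

-- restricting the deduplicated keys of M ++ T to members of M yields the deduplicated keys of M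
theorem pvOfListAppendFilter {α : Type} [BEq α] [LawfulBEq α] (M T : List α) :
    List.filter (fun c => decide (c ∈ M)) (PySem.Set.ofList (M ++ T)) = PySem.Set.ofList M := by
  rw [PySem.Set.ofList_eq_foldl, List.foldl_append, ← PySem.Set.ofList_eq_foldl]
  rw [show List.foldl PySem.Set.add (PySem.Set.ofList M) T = PySem.Set.update (PySem.Set.ofList M) T from rfl]
  rw [pvUpdateFilter _ T (PySem.Set.ofList M)
    (fun x _ hp => (PySem.Set.mem_ofList M x).mpr (of_decide_eq_true hp))]
  exact List.filter_eq_self.mpr (fun a ha => decide_eq_true ((PySem.Set.mem_ofList M a).mp ha))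

-- A's guard i + k ≤ n trims exactly the last index of the pattern range
theorem pvRangeFilter (kk nn : Int) :
    (PySem.List.pyRange 0 (nn - kk + 2)).filter (fun i => decide (i + kk ≤ nn))
      = PySem.List.pyRange 0 (nn - kk + 1) := by
  by_cases h : 0 ≤ nn - kk + 1
  · rw [show nn - kk + 2 = (nn - kk + 1) + 1 from by ring, PySem.List.pyRange_one_succ_right h,
      List.filter_append]
    have h1 : (PySem.List.pyRange 0 (nn - kk + 1)).filter (fun i => decide (i + kk ≤ nn))
        = PySem.List.pyRange 0 (nn - kk + 1) := by
      refine List.filter_eq_self.mpr (fun i hi => decide_eq_true ?_)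
      have := PySem.List.mem_pyRange_one.mp hi
      omega
    have h2 : List.filter (fun i => decide (i + kk ≤ nn)) [nn - kk + 1] = [] := by
      simp only [List.filter_cons, List.filter_nil]
      rw [if_neg (by simp; omega)]
    rw [h1, h2, List.append_nil]
  · rw [PySem.List.pyRange_one_eq_nil (by omega), PySem.List.pyRange_one_eq_nil (by omega)]
    rfl

-- abbreviations for the proofs: the (k-1)-node at i, the suffix at i, the two index ranges
def pvNode (k : Int) (Text : String) (i : Int) : String :=
  PySem.Str.slice Text (some i) (some (i + k - 1))
def pvSfx (k : Int) (Text : String) (i : Int) : String :=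
  PySem.Str.slice Text (some (i + 1)) (some (i + k))
def pvL1 (k : Int) (Text : String) : List Int :=
  PySem.List.pyRange 0 (PySem.Str.len Text - k + 1)
def pvL2 (k : Int) (Text : String) : List Int :=
  PySem.List.pyRange 0 (PySem.Str.len Text - k + 2)

-- a defaultdict(list)-append loop over keys `key i`, values `val i`: its items, closed form
theorem pvGroupFold {κ β' : Type} [BEq κ] [LawfulBEq κ] (key : Int → κ) (val : Int → β') (L : List Int) :
    (L.foldl (fun d i => d.modify (key i) [] (fun v => v ++ [val i])) PySem.Dict.empty).items
      = (PySem.Set.ofList (L.map key)).map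
          (fun c => (c, (L.filter (fun i => key i == c)).map val)) := by
  set D := L.foldl (fun d i => d.modify (key i) [] (fun v => v ++ [val i])) PySem.Dict.empty with hD
  have hkeys : D.keys = PySem.Set.ofList (L.map key) := by
    rw [hD, PySem.Dict.keys_foldl_modify_key L key [] (fun _ i => fun v => v ++ [val i])]
    rfl
  have hnd : D.keys.Nodup := by
    rw [hD]
    exact PySem.Dict.nodup_keys_foldl_modify_key L key [] _ _ PySem.Dict.nodup_keys_empty
  have hgd : ∀ c, D.getD c [] = (L.filter (fun i => key i == c)).map val := by
    intro c
    have hpair : D = (L.map (fun i => (key i, val i))).foldl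
        (fun d p => d.modify p.1 [] (fun v => v ++ [p.2])) PySem.Dict.empty := by
      rw [List.foldl_map]
    rw [hpair, PySem.Dict.getD_foldl_modify_append, PySem.Dict.getD_empty, List.nil_append,
      List.filter_map, List.map_map]
    rfl
  rw [PySem.Dict.items_eq_map_keys D hnd [], hkeys]
  exact List.map_congr_left (fun c _ => by rw [hgd c])

-- B's port, closed form
theorem pvB_closed (k : Int) (Text : String) :
    DeBruijn_alt k Text
      = (PySem.Set.ofList ((pvL1 k Text).map (pvNode k Text))).map
          (fun c => (c, ((pvL1 k Text).filter (fun i => pvNode k Text i == c)).map (pvSfx k Text))) :=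
  pvGroupFold (pvNode k Text) (pvSfx k Text) (pvL1 k Text)

-- A's port, closed form (same node/suffix functions, keys still drawn from the longer range)
theorem pvA_closed (k : Int) (Text : String) :
    DeBruijn k Text
      = ((PySem.Set.ofList ((pvL2 k Text).map (pvNode k Text))).filter
            (fun c => !((pvL1 k Text).filter (fun i => pvNode k Text i == c)).isEmpty)).map
          (fun c => (c, ((pvL1 k Text).filter (fun i => pvNode k Text i == c)).map (pvSfx k Text))) := by
  have hComp : pvComposition (k - 1) Text = (pvL2 k Text).map (pvNode k Text) := by
    unfold pvComposition pvL2 pvNode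
    rw [PySem.List.foldl_append_singleton_eq_map, List.nil_append,
      show PySem.Str.len Text - (k - 1) + 1 = PySem.Str.len Text - k + 2 from by ring]
    exact List.map_congr_left (fun i _ => by rw [show i + (k - 1) = i + k - 1 from by ring])
  have hrange2 : PySem.List.pyRange 0 (((pvComposition (k - 1) Text).length : Nat) : Int)
      = pvL2 k Text := by
    rw [hComp, List.length_map]
    unfold pvL2
    rw [PySem.List.length_pyRange_one, _root_.sub_zero, pvRange_toNat]
  have hpat : ∀ i ∈ pvL2 k Text,
      PySem.List.pyGetD (pvComposition (k - 1) Text) i "" = pvNode k Text i := by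
    intro i hi
    unfold pvL2 at hi
    have h := PySem.List.mem_pyRange_one.mp hi
    rw [hComp]
    unfold pvL2
    exact PySem.List.pyGetD_map_pyRange_of_nonneg (pvNode k Text) _ i "" h.1 h.2
  have hfilfil : ∀ c : String,
      ((pvL2 k Text).filter (fun i => pvNode k Text i == c)).filter
          (fun i => decide (i + k ≤ PySem.Str.len Text))
        = (pvL1 k Text).filter (fun i => pvNode k Text i == c) := by
    intro c
    rw [List.filter_filter]
    have h1 : pvL1 k Text
        = (pvL2 k Text).filter (fun i => decide (i + k ≤ PySem.Str.len Text)) := by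
      unfold pvL1 pvL2
      exact (pvRangeFilter k (PySem.Str.len Text)).symm
    rw [h1, List.filter_filter]
    exact List.filter_congr (fun i _ => by rw [Bool.and_comm])
  simp only [DeBruijn]
  rw [hrange2]
  rw [PySem.List.foldl_congr_mem
    (l := pvL2 k Text) (init := (PySem.Dict.empty : PySem.Dict String (List Int)))
    (f := fun d i => d.modify (PySem.List.pyGetD (pvComposition (k - 1) Text) i "") [] (fun v => v ++ [i]))
    (g := fun d i => d.modify (pvNode k Text i) [] (fun v => v ++ [i]))
    (fun d i hi => congrArg (fun s => d.modify s [] fun v => v ++ [i]) (hpat i hi))]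
  rw [show (fun (d : PySem.Dict String (List String)) (pr : String × List Int) =>
        pr.2.foldl (fun d i =>
          if i + k ≤ PySem.Str.len Text then
            d.modify pr.1 [] (fun v => v ++ [PySem.Str.slice Text (some (i + 1)) (some (i + k))])
          else d) d)
      = (fun d pr =>
          ((pr.2.filter (fun i => decide (i + k ≤ PySem.Str.len Text))).foldl
            (fun d i => d.modify pr.1 [] (fun v => v ++ [pvSfx k Text i])) d)) from
    funext fun d => funext fun pr =>
      PySem.List.foldl_ite_eq_foldl_filter (fun i => i + k ≤ PySem.Str.len Text) _ pr.2 d]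
  rw [pvOuterItems (pvSfx k Text) (fun i => decide (i + k ≤ PySem.Str.len Text)) _ _
    PySem.Dict.nodup_keys_empty (fun pr _ => PySem.Dict.contains_empty pr.1)
    (PySem.Dict.nodup_keys_foldl_modify_key (pvL2 k Text) (pvNode k Text) []
      (fun _ i => fun v => v ++ [i]) _ PySem.Dict.nodup_keys_empty)]
  rw [pvGroupFold (pvNode k Text) (fun i => i) (pvL2 k Text)]
  rw [List.filter_map, List.map_map]
  rw [show (PySem.Dict.empty : PySem.Dict String (List String)).items = [] from rfl, List.nil_append]
  rw [List.filter_congr (q := fun c =>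
      !((pvL1 k Text).filter (fun i => pvNode k Text i == c)).isEmpty)
    (fun c _ => by
      simp only [Function.comp_apply, List.map_id_fun', id]
      rw [hfilfil c])]
  exact List.map_congr_left (fun c _ => by
    simp only [Function.comp_apply, List.map_id_fun', id]
    rw [hfilfil c])

-- the filtered key list of A is B's key list
theorem pvKeys_eq (k : Int) (Text : String) :
    (PySem.Set.ofList ((pvL2 k Text).map (pvNode k Text))).filter
        (fun c => !((pvL1 k Text).filter (fun i => pvNode k Text i == c)).isEmpty)
      = PySem.Set.ofList ((pvL1 k Text).map (pvNode k Text)) := by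
  have hpred : ∀ c : String,
      (!((pvL1 k Text).filter (fun i => pvNode k Text i == c)).isEmpty)
        = decide (c ∈ (pvL1 k Text).map (pvNode k Text)) := by
    intro c
    by_cases h : c ∈ (pvL1 k Text).map (pvNode k Text)
    · obtain ⟨i, hi, hic⟩ := List.mem_map.mp h
      have hne : (pvL1 k Text).filter (fun j => pvNode k Text j == c) ≠ [] :=
        List.ne_nil_of_mem (List.mem_filter.mpr ⟨hi, by simp [hic]⟩)
      simp [h, hne]
    · have hnil : (pvL1 k Text).filter (fun j => pvNode k Text j == c) = [] :=
        List.filter_eq_nil_iff.mpr (fun j hj hbeq => h (List.mem_map.mpr ⟨j, hj, eq_of_beq hbeq⟩))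
      simp [h, hnil]
  rw [List.filter_congr (fun c _ => hpred c)]
  by_cases hcase : 0 ≤ PySem.Str.len Text - k + 1
  · have hsplit : pvL2 k Text = pvL1 k Text ++ [PySem.Str.len Text - k + 1] := by
      unfold pvL1 pvL2
      rw [show PySem.Str.len Text - k + 2 = (PySem.Str.len Text - k + 1) + 1 from by ring]
      exact PySem.List.pyRange_one_succ_right hcase
    rw [hsplit, List.map_append]
    exact pvOfListAppendFilter _ _
  · have h1 : pvL1 k Text = [] := by
      unfold pvL1; exact PySem.List.pyRange_one_eq_nil (by omega)
    have h2 : pvL2 k Text = [] := by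
      unfold pvL2; exact PySem.List.pyRange_one_eq_nil (by omega)
    rw [h1, h2]
    rfl

-- ===== VERDICT (by name: the statement is the Claim_ definition above) =====
theorem DeBruijn_spec : Claim_equal_DeBruijn := by
  intro k Text _
  unfold Spec_DeBruijn
  rw [pvA_closed, pvB_closed, pvKeys_eq]
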